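-- pv_equiv track=rewrite | github.com/Japneet001/Coding-World-Cup-2023 | DAY 38 (ENG vs PAK)/Cricket Matches.py | calculateNumberOfDays
-- ===== SOURCE A (Python) =====
-- def calculateNumberOfDays(s: str) -> int:
--
--     # write your code here
--     matches_played = 0
--     rest_day = False
--
--     for day in s:
--         if day == '1' and not rest_day:
--             matches_played += 1
--             rest_day = True
--         else:
--             rest_day = False
--
--     return matches_played
-- ===== SOURCE B (Python) =====
-- def calculateNumberOfDays(s: str) -> int:
--     # Pass 1: lengths of maximal runs of consecutive '1' characters.
--     runs = []
--     cur = 0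
--     for c in s:
--         if c == '1':
--             cur += 1
--         elif cur:
--             runs.append(cur)
--             cur = 0
--     if cur:
--         runs.append(cur)
--     # Pass 2: a run of k match days yields ceil(k/2) playable matches.
--     return sum((k + 1) // 2 for k in runs)
-- ===== Notes on version B (the rewrite author's own statement) =====
-- stated objective: alternative
-- what changed: Instead of the greedy per-character scan with a rest_day boolean, B first extracts the lengths of the maximal runs of '1' and then sums the closed form (k+1)//2 over the runs.
import Mathlib
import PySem

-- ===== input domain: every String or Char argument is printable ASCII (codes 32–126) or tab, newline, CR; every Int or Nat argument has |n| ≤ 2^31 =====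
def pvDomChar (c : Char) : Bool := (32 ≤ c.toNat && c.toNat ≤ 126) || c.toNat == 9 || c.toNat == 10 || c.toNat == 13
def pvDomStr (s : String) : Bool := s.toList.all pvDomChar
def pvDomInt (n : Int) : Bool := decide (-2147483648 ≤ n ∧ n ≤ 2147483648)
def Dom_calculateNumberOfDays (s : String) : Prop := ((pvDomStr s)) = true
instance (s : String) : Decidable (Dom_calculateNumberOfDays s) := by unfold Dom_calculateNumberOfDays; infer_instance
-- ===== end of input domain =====

-- B replaces A's greedy scan with a rest_day flag by two staged passes: extract the lengths of
-- the maximal runs of '1', then sum the closed form (k+1)//2 over the runs; objective: alternative.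

-- ===== PORT A =====
-- for day in s: if day == '1' and not rest_day: count+1, rest_day := true else rest_day := false
def pvAStep (st : Int × Bool) (c : Char) : Int × Bool :=
  if c = '1' ∧ st.2 = false then (st.1 + 1, true) else (st.1, false)

def calculateNumberOfDays (s : String) : Int :=
  (s.toList.foldl pvAStep (0, false)).1

-- ===== PORT B =====
-- Pass 1 of Source B: accumulate (runs, cur); a non-'1' with cur ≠ 0 closes a run.
def pvBStep (st : List Int × Int) (c : Char) : List Int × Int :=
  if c = '1' then (st.1, st.2 + 1)
  else if st.2 ≠ 0 then (st.1 ++ [st.2], 0)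
  else st

-- Pass 2 of Source B: sum((k + 1) // 2 for k in runs)
def pvBSum (runs : List Int) : Int :=
  runs.foldl (fun a k => a + PySem.Int.floordiv (k + 1) 2) 0

def calculateNumberOfDays_alt (s : String) : Int :=
  let st := s.toList.foldl pvBStep ([], 0)
  pvBSum (if st.2 ≠ 0 then st.1 ++ [st.2] else st.1)

-- ===== PRECONDITION & SPEC =====
def Spec_calculateNumberOfDays (s : String) (out : Int) : Prop := out = calculateNumberOfDays_alt s
instance (s : String) (out : Int) : Decidable (Spec_calculateNumberOfDays s out) := by unfold Spec_calculateNumberOfDays; infer_instance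

-- ===== CLAIM (what is proved, stated in full; the proofs are below) =====
def Claim_equal_calculateNumberOfDays : Prop := ∀ (s : String), Dom_calculateNumberOfDays s → Spec_calculateNumberOfDays s (calculateNumberOfDays s)

-- ===== LEMMAS AND PROOFS =====
theorem pvBSum_append (rs : List Int) (k : Int) :
    pvBSum (rs ++ [k]) = pvBSum rs + PySem.Int.floordiv (k + 1) 2 := by
  unfold pvBSum
  induction rs generalizing k with
  | nil => simp
  | cons r t ih =>
      simp only [List.cons_append, List.foldl_cons]
      -- both sides fold over t from shifted accumulators; generalize the accumulator
      have h : ∀ (a : Int) (l : List Int),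
          (l ++ [k]).foldl (fun a k => a + PySem.Int.floordiv (k + 1) 2) a
            = l.foldl (fun a k => a + PySem.Int.floordiv (k + 1) 2) a
              + PySem.Int.floordiv (k + 1) 2 := by
        intro a l
        induction l generalizing a with
        | nil => simp
        | cons x xs ihx => simp [List.foldl_cons]
      exact h _ t

-- ceil((c+1)/2) as Int ediv, for omega reasoning
theorem pvFd2 (c : Int) : PySem.Int.floordiv (c + 1) 2 = (c + 1) / 2 :=
  PySem.Int.floordiv_eq_ediv_of_pos (by omega)

-- Invariant: starting A's fold from (pvBSum rs + (cur+1)//2, cur odd) matches B's pipeline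
-- continued from state (rs, cur).
theorem pvKey : ∀ (l : List Char) (rs : List Int) (cur : Int), 0 ≤ cur →
    (l.foldl pvAStep (pvBSum rs + PySem.Int.floordiv (cur + 1) 2, cur % 2 = 1)).1
      = pvBSum (if (l.foldl pvBStep (rs, cur)).2 ≠ 0
                then (l.foldl pvBStep (rs, cur)).1 ++ [(l.foldl pvBStep (rs, cur)).2]
                else (l.foldl pvBStep (rs, cur)).1) := by
  intro l
  induction l with
  | nil =>
      intro rs cur hc
      simp only [List.foldl_nil]
      by_cases h : cur = 0
      · subst h
        simp
      · simp only [h, if_pos, ne_eq, not_false_iff, pvBSum_append]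
  | cons c t ih =>
      intro rs cur hc
      simp only [List.foldl_cons]
      by_cases h1 : c = '1'
      · subst h1
        by_cases ho : cur % 2 = 1
        · -- rest day: flag true, A does nothing; B extends the run
          have hA : pvAStep (pvBSum rs + PySem.Int.floordiv (cur + 1) 2, decide (cur % 2 = 1)) '1'
              = (pvBSum rs + PySem.Int.floordiv (cur + 1) 2, false) := by
            simp [pvAStep, ho]
          have harith : PySem.Int.floordiv (cur + 1) 2 = PySem.Int.floordiv (cur + 1 + 1) 2 := by
            rw [pvFd2, pvFd2]; omega
          have hodd : (false : Bool) = decide ((cur + 1) % 2 = 1) := by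
            simp; omega
          rw [hA, hodd, harith]
          have := ih rs (cur + 1) (by omega)
          simpa [pvBStep] using this
        · -- playable match: A counts; B's run grows, the ceil grows by 1
          have hA : pvAStep (pvBSum rs + PySem.Int.floordiv (cur + 1) 2, decide (cur % 2 = 1)) '1'
              = (pvBSum rs + PySem.Int.floordiv (cur + 1) 2 + 1, true) := by
            simp [pvAStep, ho]
          have harith : PySem.Int.floordiv (cur + 1) 2 + 1 = PySem.Int.floordiv (cur + 1 + 1) 2 := by
            rw [pvFd2, pvFd2]; omega
          have hodd : (true : Bool) = decide ((cur + 1) % 2 = 1) := by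
            simp; omega
          rw [hA, hodd]
          have := ih rs (cur + 1) (by omega)
          rw [add_assoc, harith]
          simpa [pvBStep] using this
      · -- any other day resets: A clears the flag; B closes the run (if any)
        have hA : pvAStep (pvBSum rs + PySem.Int.floordiv (cur + 1) 2, decide (cur % 2 = 1)) c
            = (pvBSum rs + PySem.Int.floordiv (cur + 1) 2, false) := by
          simp [pvAStep, h1]
        rw [hA]
        by_cases h0 : cur = 0
        · subst h0
          have := ih rs 0 le_rfl
          simpa [pvBStep, h1] using this
        · have hB : pvBStep (rs, cur) c = (rs ++ [cur], 0) := by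
            simp [pvBStep, h1, h0]
          have hzero : (false : Bool) = decide ((0 : Int) % 2 = 1) := by decide
          have hsum : pvBSum rs + PySem.Int.floordiv (cur + 1) 2
              = pvBSum (rs ++ [cur]) + PySem.Int.floordiv ((0 : Int) + 1) 2 := by
            rw [pvBSum_append]; simp
          rw [hB, hzero, hsum]
          exact ih (rs ++ [cur]) 0 le_rfl

-- ===== VERDICT (by name: the statement is the Claim_ definition above) =====
theorem calculateNumberOfDays_spec : Claim_equal_calculateNumberOfDays := by
  intro s _
  unfold Spec_calculateNumberOfDays calculateNumberOfDays calculateNumberOfDays_alt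
  have := pvKey s.toList [] 0 le_rfl
  simpa [pvBSum, pvFd2] using this
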